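-- pv_equiv track=rewrite | github.com/Msangwool/Algorithm | 프로그래머스/0/120815. 피자 나눠 먹기 （2）/피자 나눠 먹기 （2）.py | solution
-- ===== SOURCE A (Python) =====
-- def solution(n):
--     answer = 0
--     if n % 6 == 0:
--         return n//6
--
--     # 최소 공배수
--     # |두 수의 곱| // 최대 공약수
--
--     # 최대 공약수
--     GCD = 0
--     if n > 6:
--         GCD = max([i for i in range(1, n+1) if 6%i==0 and n%i==0])
--     else:
--         GCD = max([i for i in range(1, 7) if n%i==0 and 6%i==0])
--
--     return (abs(n*6)//GCD)//6
-- ===== SOURCE B (Python) =====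
-- def solution(n):
--     if n % 6 == 0:
--         return n // 6
--     # Euclidean algorithm on (6, |n|) replaces A's divisor-enumeration max()
--     a, b = 6, abs(n)
--     while b:
--         a, b = b, a % b
--     return (abs(n * 6) // a) // 6
-- ===== Notes on version B (the rewrite author's own statement) =====
-- stated objective: faster
-- what changed: The gcd, which A computes by scanning all candidates in range(1, n+1) (or range(1,7)) and taking max of the common divisors, is computed in B by an iterative Euclidean algorithm on (6, abs(n)); the n%6 short-circuit and the lcm//6 formula are kept.
import Mathlib
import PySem

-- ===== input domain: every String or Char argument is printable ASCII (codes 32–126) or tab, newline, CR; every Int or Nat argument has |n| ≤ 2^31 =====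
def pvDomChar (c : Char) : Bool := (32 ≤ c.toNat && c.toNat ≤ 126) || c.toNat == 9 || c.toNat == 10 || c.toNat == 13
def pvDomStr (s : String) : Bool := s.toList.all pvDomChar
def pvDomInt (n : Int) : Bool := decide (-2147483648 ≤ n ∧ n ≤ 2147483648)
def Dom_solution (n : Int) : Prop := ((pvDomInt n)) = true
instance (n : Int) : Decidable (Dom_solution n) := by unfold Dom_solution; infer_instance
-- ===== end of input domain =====

-- B replaces A's O(n) divisor-enumeration gcd with an O(log n) Euclidean loop (objective: faster).

-- ===== PORT A =====
def solution (n : Int) : Int :=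
  -- answer = 0 is dead in A
  if PySem.Int.mod n 6 = 0 then PySem.Int.floordiv n 6
  else
    -- GCD = 0 is immediately overwritten in A
    let GCD : Int :=
      if n > 6 then
        -- Python max raises on an empty list; unreachable here (i = 1 always qualifies), getD 0 is dead
        (PySem.List.max? ((PySem.List.pyRange 1 (n+1) 1).filter
            (fun i => PySem.Int.mod 6 i == 0 && PySem.Int.mod n i == 0)) (fun x => x)).getD 0
      else
        (PySem.List.max? ((PySem.List.pyRange 1 7 1).filter
            (fun i => PySem.Int.mod n i == 0 && PySem.Int.mod 6 i == 0)) (fun x => x)).getD 0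
    PySem.Int.floordiv (PySem.Int.floordiv |n * 6| GCD) 6

-- ===== PORT B =====
-- the `while b: a, b = b, a % b` loop of Source B
def euclidLoop (a b : Int) : Int :=
  if hb : b = 0 then a else euclidLoop b (PySem.Int.mod a b)
termination_by b.natAbs
decreasing_by
  rcases lt_or_gt_of_ne hb with h | h
  · have := PySem.Int.mod_neg_bounds a h; omega
  · have h1 := PySem.Int.mod_nonneg a h; have h2 := PySem.Int.mod_lt a h; omega

def solution_alt (n : Int) : Int :=
  if PySem.Int.mod n 6 = 0 then PySem.Int.floordiv n 6
  else
    let a := euclidLoop 6 |n|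
    PySem.Int.floordiv (PySem.Int.floordiv |n * 6| a) 6

-- ===== PRECONDITION & SPEC =====
def Spec_solution (n : Int) (out : Int) : Prop := out = solution_alt n
instance (n : Int) (out : Int) : Decidable (Spec_solution n out) := by unfold Spec_solution; infer_instance

-- ===== CLAIM (what is proved, stated in full; the proofs are below) =====
def Claim_equal_solution : Prop := ∀ (n : Int), Dom_solution n → Spec_solution n (solution n)

-- ===== LEMMAS AND PROOFS =====

-- the Euclidean loop computes the gcd
theorem euclidLoop_eq_gcd (x y : Nat) : euclidLoop (x : Int) (y : Int) = (Nat.gcd x y : Int) := by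
  induction y using Nat.strong_induction_on generalizing x with
  | _ y ih =>
    rw [euclidLoop]
    by_cases hy : y = 0
    · subst hy; simp
    · rw [dif_neg (by simpa using hy)]
      simp only [PySem.Int.mod_natCast]
      rw [ih (x % y) (Nat.mod_lt _ (Nat.pos_of_ne_zero hy)) y]
      rw [Nat.gcd_comm y, ← Nat.gcd_rec, Nat.gcd_comm]

theorem euclidLoop_abs (n : Int) : euclidLoop 6 |n| = (Int.gcd 6 n : Int) := by
  rw [Int.abs_eq_natAbs, show (6 : Int) = ((6 : Nat) : Int) from rfl, euclidLoop_eq_gcd]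
  rfl

theorem gcd_six_mod (n : Int) : Int.gcd 6 (n % 6) = Int.gcd 6 n := by
  rw [Int.emod_def, show n - 6 * (n / 6) = n + (-(n / 6)) * 6 by ring]
  exact Int.gcd_add_mul_right_right 6 n _

theorem mod_two_of_mod_six (n : Int) : PySem.Int.mod n 2 = PySem.Int.mod n 6 % 2 := by
  rw [PySem.Int.mod_eq_emod_of_pos (by norm_num), PySem.Int.mod_eq_emod_of_pos (by norm_num)]
  rw [Int.emod_emod_of_dvd n (by norm_num)]

theorem mod_three_of_mod_six (n : Int) : PySem.Int.mod n 3 = PySem.Int.mod n 6 % 3 := by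
  rw [PySem.Int.mod_eq_emod_of_pos (by norm_num), PySem.Int.mod_eq_emod_of_pos (by norm_num)]
  rw [Int.emod_emod_of_dvd n (by norm_num)]

-- the small-range filtered list (both conjunct orders), once n%2 and n%3 are known
theorem filter_small_eval (n : Int) (p : Int → Bool)
    (h1 : p 1 = true) (h4 : p 4 = false) (h5 : p 5 = false) (h6 : p 6 = false) :
    (PySem.List.pyRange 1 7 1).filter p =
      1 :: ((if p 2 then [2] else []) ++ (if p 3 then [3] else [])) := by
  have : PySem.List.pyRange 1 7 1 = [1, 2, 3, 4, 5, 6] := by decide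
  rw [this]
  simp only [List.filter, h1, h4, h5, h6]
  by_cases h2 : p 2 <;> by_cases h3 : p 3 <;> simp [h2, h3]

-- A's GCD (the max over the filtered list) equals gcd 6 n when n % 6 ≠ 0
theorem gcdA_eq (n : Int) (hne : PySem.Int.mod n 6 ≠ 0) :
    (if n > 6 then
        (PySem.List.max? ((PySem.List.pyRange 1 (n+1) 1).filter
            (fun i => PySem.Int.mod 6 i == 0 && PySem.Int.mod n i == 0)) (fun x => x)).getD 0
      else
        (PySem.List.max? ((PySem.List.pyRange 1 7 1).filter
            (fun i => PySem.Int.mod n i == 0 && PySem.Int.mod 6 i == 0)) (fun x => x)).getD 0)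
      = (Int.gcd 6 n : Int) := by
  have hr6 : PySem.Int.mod n 6 = n % 6 := PySem.Int.mod_eq_emod_of_pos (by norm_num)
  have hr0 : 0 ≤ n % 6 := Int.emod_nonneg n (by norm_num)
  have hrlt : n % 6 < 6 := Int.emod_lt_of_pos n (by norm_num)
  have hgcd : Int.gcd 6 n = Int.gcd 6 (n % 6) := (gcd_six_mod n).symm
  have h2 : PySem.Int.mod n 2 = n % 6 % 2 := by rw [mod_two_of_mod_six, hr6]
  have h3 : PySem.Int.mod n 3 = n % 6 % 3 := by rw [mod_three_of_mod_six, hr6]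
  have hcase : n % 6 = 1 ∨ n % 6 = 2 ∨ n % 6 = 3 ∨ n % 6 = 4 ∨ n % 6 = 5 := by
    rw [hr6] at hne; omega
  -- the filter over range(1, n+1) (branch n > 6) collapses to the filter over range(1, 7)
  have hbig : ∀ hn : 6 < n,
      (PySem.List.pyRange 1 (n+1) 1).filter
          (fun i => PySem.Int.mod 6 i == 0 && PySem.Int.mod n i == 0) =
      (PySem.List.pyRange 1 7 1).filter
          (fun i => PySem.Int.mod 6 i == 0 && PySem.Int.mod n i == 0) := by
    intro hn
    rw [PySem.List.pyRange_one_append 1 7 (n+1) (by norm_num) (by omega), List.filter_append]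
    have : (PySem.List.pyRange 7 (n+1) 1).filter
        (fun i => PySem.Int.mod 6 i == 0 && PySem.Int.mod n i == 0) = [] := by
      rw [List.filter_eq_nil_iff]
      intro x hx
      rw [PySem.List.mem_pyRange_one] at hx
      have hm : PySem.Int.mod 6 x = 6 := by
        rw [PySem.Int.mod_eq_emod_of_pos (by omega)]
        exact Int.emod_eq_of_lt (by norm_num) (by omega)
      simp [hm]
    rw [this, List.append_nil]
  -- evaluate each mod at the six sample points, then decide in each residue case
  have e1a : PySem.Int.mod 6 1 = 0 := by decide
  have e1b : PySem.Int.mod n 1 = 0 := by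
    rw [PySem.Int.mod_eq_zero_iff_dvd]; exact one_dvd n
  have e4 : PySem.Int.mod 6 4 = 2 := by decide
  have e5 : PySem.Int.mod 6 5 = 1 := by decide
  have e6 : PySem.Int.mod 6 6 = 0 := by decide
  have e2 : PySem.Int.mod 6 2 = 0 := by decide
  have e3 : PySem.Int.mod 6 3 = 0 := by decide
  have hdvd6 : ¬(6:Int) ∣ n := by rw [← PySem.Int.mod_eq_zero_iff_dvd]; exact hne
  split_ifs with hn
  · rw [hbig hn,
      filter_small_eval n _ (by simp [e1a, e1b]) (by simp [e4]) (by simp [e5])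
        (by simp [e6, PySem.Int.mod_eq_zero_iff_dvd, hdvd6])]
    rw [hgcd]
    by_cases hd2 : (2:Int) ∣ n <;> by_cases hd3 : (3:Int) ∣ n
    · exact absurd (by omega : (6:Int) ∣ n) hdvd6
    · have hc : n % 6 = 2 ∨ n % 6 = 4 := by omega
      rcases hc with h | h <;> rw [h] <;>
        simp [PySem.List.max?_id_cons, PySem.Int.mod_eq_zero_iff_dvd, hd2, hd3, e2, e3] <;> decide
    · have hc : n % 6 = 3 := by omega
      rw [hc]
      simp [PySem.List.max?_id_cons, PySem.Int.mod_eq_zero_iff_dvd, hd2, hd3, e2, e3] <;> decide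
    · have hc : n % 6 = 1 ∨ n % 6 = 5 := by omega
      rcases hc with h | h <;> rw [h] <;>
        simp [PySem.List.max?_id_cons, PySem.Int.mod_eq_zero_iff_dvd, hd2, hd3, e2, e3] <;> decide
  · rw [filter_small_eval n _ (by simp [e1a, e1b]) (by simp [e4]) (by simp [e5])
        (by simp [e6, PySem.Int.mod_eq_zero_iff_dvd, hdvd6])]
    rw [hgcd]
    by_cases hd2 : (2:Int) ∣ n <;> by_cases hd3 : (3:Int) ∣ n
    · exact absurd (by omega : (6:Int) ∣ n) hdvd6
    · have hc : n % 6 = 2 ∨ n % 6 = 4 := by omega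
      rcases hc with h | h <;> rw [h] <;>
        simp [PySem.List.max?_id_cons, PySem.Int.mod_eq_zero_iff_dvd, hd2, hd3, e2, e3] <;> decide
    · have hc : n % 6 = 3 := by omega
      rw [hc]
      simp [PySem.List.max?_id_cons, PySem.Int.mod_eq_zero_iff_dvd, hd2, hd3, e2, e3] <;> decide
    · have hc : n % 6 = 1 ∨ n % 6 = 5 := by omega
      rcases hc with h | h <;> rw [h] <;>
        simp [PySem.List.max?_id_cons, PySem.Int.mod_eq_zero_iff_dvd, hd2, hd3, e2, e3] <;> decide

-- ===== VERDICT (by name: the statement is the Claim_ definition above) =====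
theorem solution_spec : Claim_equal_solution := by
  intro n _
  unfold Spec_solution solution solution_alt
  by_cases h6 : PySem.Int.mod n 6 = 0
  · rw [if_pos h6, if_pos h6]
  · rw [if_neg h6, if_neg h6, gcdA_eq n h6, euclidLoop_abs]
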